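-- pv_equiv track=rewrite | github.com/kkundercover/IWMS | pathfind5.py | snap_to_road
-- ===== SOURCE A (Python) =====
-- SNAP_RADIUS     = 30
--
-- def snap_to_road(mask, point, w, h, radius=SNAP_RADIUS):
--     x, y = point
--     if 0 <= x < w and 0 <= y < h and mask[x][y]:
--         return point
--     best, best_d = None, float('inf')
--     for dx in range(-radius, radius + 1):
--         for dy in range(-radius, radius + 1):
--             nx, ny = x + dx, y + dy
--             if 0 <= nx < w and 0 <= ny < h and mask[nx][ny]:
--                 d = dx * dx + dy * dy
--                 if d < best_d:
--                     best_d, best = d, (nx, ny)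
--     return best
-- ===== SOURCE B (Python) =====
-- SNAP_RADIUS     = 30
--
-- def snap_to_road(mask, point, w, h, radius=SNAP_RADIUS):
--     x, y = point
--     if 0 <= x < w and 0 <= y < h and mask[x][y]:
--         return point
--     offsets = sorted((dx * dx + dy * dy, dx, dy)
--                      for dx in range(max(-radius, -x), min(radius, w - 1 - x) + 1)
--                      for dy in range(max(-radius, -y), min(radius, h - 1 - y) + 1))
--     for _, dx, dy in offsets:
--         nx, ny = x + dx, y + dy
--         if mask[nx][ny]:
--             return (nx, ny)
--     return None
-- ===== Notes on version B (the rewrite author's own statement) =====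
-- stated objective: alternative
-- what changed: Replaces the exhaustive square scan with a running strict-min accumulator by a distance-sorted offset table, clamped to the in-bounds band, scanned with early exit at the first road cell; the (d,dx,dy) sort key reproduces A's row-major tie-break.
import Mathlib
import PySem

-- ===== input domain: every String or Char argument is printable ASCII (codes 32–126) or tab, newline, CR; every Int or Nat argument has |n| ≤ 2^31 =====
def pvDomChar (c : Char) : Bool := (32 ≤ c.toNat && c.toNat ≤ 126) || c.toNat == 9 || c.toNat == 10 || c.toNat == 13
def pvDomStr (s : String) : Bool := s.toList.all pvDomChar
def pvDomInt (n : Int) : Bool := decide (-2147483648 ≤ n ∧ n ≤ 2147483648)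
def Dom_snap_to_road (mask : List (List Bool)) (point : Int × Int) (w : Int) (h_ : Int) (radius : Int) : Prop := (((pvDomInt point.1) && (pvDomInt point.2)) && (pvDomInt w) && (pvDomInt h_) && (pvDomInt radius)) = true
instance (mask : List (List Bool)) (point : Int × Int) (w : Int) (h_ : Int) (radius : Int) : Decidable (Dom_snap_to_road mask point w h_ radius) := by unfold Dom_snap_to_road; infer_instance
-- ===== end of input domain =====

-- B replaces A's exhaustive square scan (running strict-min accumulator) by a (d,dx,dy)-sorted
-- offset table scanned with early exit; alternative algorithm, same return value on Pre_.


-- ===== PORT A =====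
-- mask[i][j] behind the bounds guard; pyGetD's default is unreachable inside Pre_ (exact there)
def pvMaskAt (mask : List (List Bool)) (i j : Int) : Bool :=
  PySem.List.pyGetD (PySem.List.pyGetD mask i []) j false

-- the guard '0 <= i < w and 0 <= j < h and mask[i][j]' shared verbatim by both Pythons
def pvOk (mask : List (List Bool)) (w h_ : Int) (i j : Int) : Bool :=
  decide (0 ≤ i) && decide (i < w) && decide (0 ≤ j) && decide (j < h_) && pvMaskAt mask i j

-- 'd < best_d' with best_d = float('inf') modelled as none
def pvDlt (d : Int) (m : Option Int) : Bool :=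
  match m with
  | none => true
  | some v => decide (d < v)

def snap_to_road (mask : List (List Bool)) (point : Int × Int) (w : Int) (h_ : Int) (radius : Int) : Option (Int × Int) :=
  let x := point.1
  let y := point.2
  if pvOk mask w h_ x y then some point
  else
    (List.foldl (fun (s : Option (Int × Int) × Option Int) dx =>
        List.foldl (fun (s : Option (Int × Int) × Option Int) dy =>
          let nx := x + dx
          let ny := y + dy
          if pvOk mask w h_ nx ny then
            let d := dx * dx + dy * dy
            if pvDlt d s.2 then (some (nx, ny), some d) else s
          else s) s (PySem.List.pyRange (-radius) (radius + 1) 1))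
      ((none : Option (Int × Int)), (none : Option Int))
      (PySem.List.pyRange (-radius) (radius + 1) 1)).1

-- ===== PORT B =====
-- Python tuple comparison on (d, dx, dy) is lexicographic
def pvKey (t : Int × Int × Int) : Int ×ₗ (Int ×ₗ Int) := toLex (t.1, toLex (t.2.1, t.2.2))

def snap_to_road_alt (mask : List (List Bool)) (point : Int × Int) (w : Int) (h_ : Int) (radius : Int) : Option (Int × Int) :=
  let x := point.1
  let y := point.2
  if pvOk mask w h_ x y then some point
  else
    let offsets := PySem.List.sorted
      ((PySem.List.pyRange (max (-radius) (-x)) (min radius (w - 1 - x) + 1) 1).flatMap (fun dx =>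
        (PySem.List.pyRange (max (-radius) (-y)) (min radius (h_ - 1 - y) + 1) 1).map
          (fun dy => (dx * dx + dy * dy, dx, dy))))
      pvKey false
    match offsets.find? (fun t => pvMaskAt mask (x + t.2.1) (y + t.2.2)) with
    | some t => some (x + t.2.1, y + t.2.2)
    | none => none

-- ===== PRECONDITION & SPEC =====
-- Pre_ is exactly the condition under which the Python raises no IndexError: the initial cell
-- (x,y), if probed, lies inside mask, and — unless that probe hits a road cell, which skips the
-- loop — every cell of the search window clipped to [0,w)×[0,h) lies inside mask.
def Pre_snap_to_road (mask : List (List Bool)) (point : Int × Int) (w : Int) (h_ : Int) (radius : Int) : Prop :=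
  ((0 ≤ point.1 ∧ point.1 < w ∧ 0 ≤ point.2 ∧ point.2 < h_) →
      point.1 < (mask.length : Int) ∧ point.2 < ((mask.getD point.1.toNat []).length : Int)) ∧
  ((0 ≤ point.1 ∧ point.1 < w ∧ 0 ≤ point.2 ∧ point.2 < h_ ∧
      (mask.getD point.1.toNat []).getD point.2.toNat false = true) ∨
    ((0 < w ∧ 0 ≤ point.1 + radius ∧ point.1 - radius < w ∧ 0 ≤ radius ∧
        0 < h_ ∧ 0 ≤ point.2 + radius ∧ point.2 - radius < h_) →
      (w ≤ (mask.length : Int) ∨ point.1 + radius < (mask.length : Int)) ∧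
      ∀ pr ∈ mask.zipIdx,
        (point.1 - radius ≤ (pr.2 : Int) ∧ (pr.2 : Int) ≤ point.1 + radius ∧ (pr.2 : Int) < w →
          h_ ≤ (pr.1.length : Int) ∨ point.2 + radius < (pr.1.length : Int))))
instance (mask : List (List Bool)) (point : Int × Int) (w : Int) (h_ : Int) (radius : Int) : Decidable (Pre_snap_to_road mask point w h_ radius) := by unfold Pre_snap_to_road; infer_instance

def pvWitness_snap_to_road : List (List Bool) × (Int × Int) × Int × Int × Int :=
  ([[false, true]], (0, 0), 1, 2, 1)

def Spec_snap_to_road (mask : List (List Bool)) (point : Int × Int) (w : Int) (h_ : Int) (radius : Int) (out : Option (Int × Int)) : Prop := out = snap_to_road_alt mask point w h_ radius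
instance (mask : List (List Bool)) (point : Int × Int) (w : Int) (h_ : Int) (radius : Int) (out : Option (Int × Int)) : Decidable (Spec_snap_to_road mask point w h_ radius out) := by unfold Spec_snap_to_road; infer_instance

-- ===== CLAIM (what is proved, stated in full; the proofs are below) =====
def Claim_equal_snap_to_road : Prop := ∀ (mask : List (List Bool)) (point : Int × Int) (w : Int) (h_ : Int) (radius : Int), Dom_snap_to_road mask point w h_ radius → Pre_snap_to_road mask point w h_ radius → Spec_snap_to_road mask point w h_ radius (snap_to_road mask point w h_ radius)

-- ===== LEMMAS AND PROOFS =====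

-- squared distance and the (d, dx, dy) triple of an offset
def pvD (p : Int × Int) : Int := p.1 * p.1 + p.2 * p.2
def pvTrip (p : Int × Int) : Int × Int × Int := (pvD p, p.1, p.2)

-- A's loop body as a step function over offsets (V abstracts the bounds-and-mask guard)
def pvStep (V : Int × Int → Bool) (x y : Int) (s : Option (Int × Int) × Option Int) (p : Int × Int) : Option (Int × Int) × Option Int :=
  if V p then (if pvDlt (pvD p) s.2 then (some (x + p.1, y + p.2), some (pvD p)) else s) else s

-- characterization of A's fold: the earliest strict improvement chain's final element
def pvG (V : Int × Int → Bool) : Option Int → List (Int × Int) → Option (Int × Int)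
  | _, [] => none
  | m, p :: L => if V p && pvDlt (pvD p) m then some ((pvG V (some (pvD p)) L).getD p) else pvG V m L

-- pair lexicographic strict order (row-major enumeration order of the offsets)
def pvPlex (a b : Int × Int) : Prop := a.1 < b.1 ∨ (a.1 = b.1 ∧ a.2 < b.2)

theorem pvFold_char (V : Int × Int → Bool) (x y : Int) :
    ∀ (L : List (Int × Int)) (b : Option (Int × Int)) (m : Option Int),
      L.foldl (pvStep V x y) (b, m) =
        match pvG V m L with
        | none => (b, m)
        | some q => (some (x + q.1, y + q.2), some (pvD q)) := by
  intro L
  induction L with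
  | nil => intro b m; rfl
  | cons p L ih =>
    intro b m
    by_cases hv : V p = true
    · by_cases hd : pvDlt (pvD p) m = true
      · simp only [List.foldl_cons, pvStep, pvG, hv, hd, Bool.and_self, if_true]
        rw [ih]
        cases pvG V (some (pvD p)) L <;> simp
      · rw [Bool.not_eq_true] at hd
        simp only [List.foldl_cons, pvStep, pvG, hv, hd, Bool.and_false, if_true,
          Bool.false_eq_true, if_false]
        exact ih b m
    · rw [Bool.not_eq_true] at hv
      simp only [List.foldl_cons, pvStep, pvG, hv, Bool.false_and, Bool.false_eq_true,
        if_false]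
      exact ih b m

theorem pvG_none (V : Int × Int → Bool) :
    ∀ (L : List (Int × Int)) (m : Option Int),
      pvG V m L = none ↔ ∀ p ∈ L, ¬(V p = true ∧ pvDlt (pvD p) m = true) := by
  intro L
  induction L with
  | nil => intro m; simp [pvG]
  | cons p L ih =>
    intro m
    by_cases h : (V p && pvDlt (pvD p) m) = true
    · rw [Bool.and_eq_true] at h
      simp only [pvG, h.1, h.2, Bool.and_self, if_true, List.mem_cons]
      constructor
      · intro hc; cases hg : pvG V (some (pvD p)) L <;> simp [hg] at hc
      · intro hall; exact absurd ⟨h.1, h.2⟩ (hall p (Or.inl rfl))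
    · have h' : (V p && pvDlt (pvD p) m) = false := by rwa [Bool.not_eq_true] at h
      simp only [pvG, h', Bool.false_eq_true, if_false, List.mem_cons]
      rw [ih]
      constructor
      · intro hall q hq
        rcases hq with rfl | hq
        · rintro ⟨hv, hd⟩; simp [hv, hd] at h'
        · exact hall q hq
      · intro hall q hq; exact hall q (Or.inr hq)

theorem pvKeyTrip_lt (q r : Int × Int) :
    pvKey (pvTrip q) < pvKey (pvTrip r) ↔ pvD q < pvD r ∨ (pvD q = pvD r ∧ pvPlex q r) := by
  simp [pvKey, pvTrip, pvPlex, Prod.Lex.toLex_lt_toLex]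

theorem pvDlt_some (d v : Int) : pvDlt d (some v) = true ↔ d < v := by
  simp [pvDlt]

theorem pvG_spec (V : Int × Int → Bool) :
    ∀ (L : List (Int × Int)) (m : Option Int) (q : Int × Int),
      L.Pairwise pvPlex → pvG V m L = some q →
      q ∈ L ∧ V q = true ∧ pvDlt (pvD q) m = true ∧
        ∀ p ∈ L, V p = true → pvDlt (pvD p) m = true → p = q ∨ pvKey (pvTrip q) < pvKey (pvTrip p) := by
  intro L
  induction L with
  | nil => intro m q _ h; simp [pvG] at h
  | cons p L ih =>
    intro m q hpw hg
    rw [List.pairwise_cons] at hpw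
    obtain ⟨hp, hpwL⟩ := hpw
    simp only [pvG] at hg
    by_cases h : (V p && pvDlt (pvD p) m) = true
    · rw [Bool.and_eq_true] at h
      rw [if_pos (by simp [h.1, h.2])] at hg
      rw [Option.some.injEq] at hg
      cases hG : pvG V (some (pvD p)) L with
      | none =>
        rw [hG] at hg
        simp only [Option.getD_none] at hg
        subst hg
        refine ⟨List.mem_cons_self, h.1, h.2, ?_⟩
        intro r hr hVr _
        rcases List.mem_cons.mp hr with rfl | hr
        · exact Or.inl rfl
        · have hno := (pvG_none V L (some (pvD p))).mp hG r hr
          have hle : pvD p ≤ pvD r := by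
            by_contra hlt
            exact hno ⟨hVr, (pvDlt_some _ _).mpr (by omega)⟩
          rcases lt_or_eq_of_le hle with hlt | heq
          · exact Or.inr ((pvKeyTrip_lt p r).mpr (Or.inl hlt))
          · exact Or.inr ((pvKeyTrip_lt p r).mpr (Or.inr ⟨heq, hp r hr⟩))
      | some q' =>
        rw [hG] at hg
        simp only [Option.getD_some] at hg
        subst hg
        obtain ⟨hqL, hVq, hdq, hmin⟩ := ih (some (pvD p)) q' hpwL hG
        have hlt : pvD q' < pvD p := (pvDlt_some _ _).mp hdq
        have hdqm : pvDlt (pvD q') m = true := by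
          cases m with
          | none => rfl
          | some v =>
            have := (pvDlt_some _ _).mp h.2
            exact (pvDlt_some _ _).mpr (by omega)
        refine ⟨List.mem_cons_of_mem _ hqL, hVq, hdqm, ?_⟩
        intro r hr hVr hdr
        rcases List.mem_cons.mp hr with rfl | hr
        · exact Or.inr ((pvKeyTrip_lt q' r).mpr (Or.inl hlt))
        · by_cases hrd : pvDlt (pvD r) (some (pvD p)) = true
          · exact hmin r hr hVr hrd
          · have hge : ¬ (pvD r < pvD p) := fun hc => hrd ((pvDlt_some _ _).mpr hc)
            exact Or.inr ((pvKeyTrip_lt q' r).mpr (Or.inl (by omega)))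
    · have h' : (V p && pvDlt (pvD p) m) = false := by rwa [Bool.not_eq_true] at h
      rw [if_neg (by simp [h'])] at hg
      obtain ⟨hqL, hVq, hdq, hmin⟩ := ih m q hpwL hg
      refine ⟨List.mem_cons_of_mem _ hqL, hVq, hdq, ?_⟩
      intro r hr hVr hdr
      rcases List.mem_cons.mp hr with rfl | hr
      · exfalso; simp [hVr, hdr] at h'
      · exact hmin r hr hVr hdr

theorem pvFind_sorted (P : Int × Int × Int → Bool) :
    ∀ (S : List (Int × Int × Int)) (t₀ : Int × Int × Int),
      S.Pairwise (fun a b => pvKey a ≤ pvKey b) → t₀ ∈ S → P t₀ = true →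
      (∀ t ∈ S, P t = true → t = t₀ ∨ pvKey t₀ < pvKey t) →
      S.find? P = some t₀ := by
  intro S
  induction S with
  | nil => intro t₀ _ h _ _; simp at h
  | cons t S ih =>
    intro t₀ hpw ht hP hmin
    rw [List.pairwise_cons] at hpw
    obtain ⟨hle, hpwS⟩ := hpw
    by_cases hPt : P t = true
    · rw [List.find?_cons_of_pos hPt]
      rcases hmin t List.mem_cons_self hPt with rfl | hlt
      · rfl
      · rcases List.mem_cons.mp ht with rfl | ht'
        · rfl
        · exact absurd hlt (not_lt.mpr (hle t₀ ht'))
    · rw [List.find?_cons_of_neg (by simpa using hPt)]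
      have ht' : t₀ ∈ S := by
        rcases List.mem_cons.mp ht with rfl | h
        · exact absurd hP hPt
        · exact h
      exact ih t₀ hpwS ht' hP (fun r hr hPr => hmin r (List.mem_cons_of_mem _ hr) hPr)

theorem pvL_pairwise (a b : Int) :
    ((PySem.List.pyRange a b 1).flatMap (fun dx =>
      (PySem.List.pyRange a b 1).map (fun dy => (dx, dy)))).Pairwise pvPlex := by
  rw [List.pairwise_flatMap]
  constructor
  · intro dx _
    rw [List.pairwise_map]
    exact (PySem.List.pairwise_lt_pyRange_one a b).imp (fun h => Or.inr ⟨rfl, h⟩)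
  · refine (PySem.List.pairwise_lt_pyRange_one a b).imp ?_
    intro u v huv p hp q hq
    simp only [List.mem_map] at hp hq
    obtain ⟨d1, _, rfl⟩ := hp
    obtain ⟨d2, _, rfl⟩ := hq
    exact Or.inl huv

-- ===== VERDICT (by name: the statement is the Claim_ definition above) =====
theorem snap_to_road_spec : Claim_equal_snap_to_road := by
  intro mask point w h_ radius _ _
  show snap_to_road mask point w h_ radius = snap_to_road_alt mask point w h_ radius
  simp only [snap_to_road, snap_to_road_alt]
  by_cases h0 : pvOk mask w h_ point.1 point.2 = true
  · simp [h0]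
  · simp only [h0, Bool.false_eq_true, if_false]
    set x := point.1
    set y := point.2
    set V : Int × Int → Bool := fun p => pvOk mask w h_ (x + p.1) (y + p.2) with hV
    set R := PySem.List.pyRange (-radius) (radius + 1) 1 with hR
    set L := R.flatMap (fun dx => R.map fun dy => (dx, dy)) with hL
    set RX := PySem.List.pyRange (max (-radius) (-x)) (min radius (w - 1 - x) + 1) 1 with hRX
    set RY := PySem.List.pyRange (max (-radius) (-y)) (min radius (h_ - 1 - y) + 1) 1 with hRY
    set LB := RX.flatMap (fun dx => RY.map fun dy => (dx, dy)) with hLB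
    -- every clamped offset is in bounds, so B's mask test agrees with the full guard there
    have hPB : ∀ p ∈ LB, pvMaskAt mask (x + p.1) (y + p.2) = V p := by
      intro p hp
      rcases List.mem_flatMap.mp hp with ⟨dx, hdx, hq⟩
      rcases List.mem_map.mp hq with ⟨dy, hdy, rfl⟩
      rw [hRX, PySem.List.mem_pyRange_one] at hdx
      rw [hRY, PySem.List.mem_pyRange_one] at hdy
      have h1 : 0 ≤ x + dx := by omega
      have h2 : x + dx < w := by omega
      have h3 : 0 ≤ y + dy := by omega
      have h4 : y + dy < h_ := by omega
      simp [hV, pvOk, h1, h2, h3, h4]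
    -- every clamped offset lies in the full square
    have hsub : ∀ p ∈ LB, p ∈ L := by
      intro p hp
      rcases List.mem_flatMap.mp hp with ⟨dx, hdx, hq⟩
      rcases List.mem_map.mp hq with ⟨dy, hdy, rfl⟩
      rw [hRX, PySem.List.mem_pyRange_one] at hdx
      rw [hRY, PySem.List.mem_pyRange_one] at hdy
      exact List.mem_flatMap.mpr ⟨dx, by rw [hR, PySem.List.mem_pyRange_one]; omega,
        List.mem_map.mpr ⟨dy, by rw [hR, PySem.List.mem_pyRange_one]; omega, rfl⟩⟩
    have hinner : ∀ (dx : Int) (s : Option (Int × Int) × Option Int),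
        (R.map (fun dy => (dx, dy))).foldl (pvStep V x y) s =
          R.foldl (fun s dy => pvStep V x y s (dx, dy)) s := by
      intro dx s; rw [List.foldl_map]
    have hAfold :
        (List.foldl (fun (s : Option (Int × Int) × Option Int) dx =>
            List.foldl (fun (s : Option (Int × Int) × Option Int) dy =>
              let nx := x + dx
              let ny := y + dy
              if pvOk mask w h_ nx ny then
                let d := dx * dx + dy * dy
                if pvDlt d s.2 then (some (nx, ny), some d) else s
              else s) s R)
          ((none : Option (Int × Int)), (none : Option Int)) R)
          = L.foldl (pvStep V x y) (none, none) := by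
      rw [hL, List.foldl_flatMap]
      simp only [hinner]
      rfl
    have hT : RX.flatMap (fun dx => RY.map (fun dy => (dx * dx + dy * dy, dx, dy)))
        = LB.map pvTrip := by
      rw [hLB, List.map_flatMap]
      simp only [List.map_map]
      rfl
    rw [hAfold, hT, pvFold_char V x y L none none]
    have hpw := pvL_pairwise (-radius) (radius + 1)
    rw [← hL] at hpw
    cases hG : pvG V none L with
    | none =>
      have hnone : (PySem.List.sorted (LB.map pvTrip) pvKey false).find?
          (fun t => pvMaskAt mask (x + t.2.1) (y + t.2.2)) = none := by
        rw [List.find?_eq_none]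
        intro t htm
        rw [PySem.List.mem_sorted] at htm
        obtain ⟨p, hpB, rfl⟩ := List.mem_map.mp htm
        have hVp := (pvG_none V L none).mp hG p (hsub p hpB)
        intro hc0
        have hc : pvMaskAt mask (x + p.1) (y + p.2) = true := hc0
        rw [hPB p hpB] at hc
        exact hVp ⟨hc, rfl⟩
      rw [hnone]
    | some q =>
      obtain ⟨hqL, hVq, _, hmin⟩ := pvG_spec V L none q hpw hG
      -- q is inside the clamped window: it is valid (bounds hold) and inside the full square
      have hqB : q ∈ LB := by
        rcases List.mem_flatMap.mp hqL with ⟨dx, hdx, hq⟩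
        rcases List.mem_map.mp hq with ⟨dy, hdy, rfl⟩
        rw [hR, PySem.List.mem_pyRange_one] at hdx hdy
        have hVq' := hVq
        simp only [hV, pvOk, Bool.and_eq_true, decide_eq_true_eq] at hVq'
        obtain ⟨⟨⟨⟨h1, h2⟩, h3⟩, h4⟩, _⟩ := hVq'
        exact List.mem_flatMap.mpr ⟨dx, by rw [hRX, PySem.List.mem_pyRange_one]; omega,
          List.mem_map.mpr ⟨dy, by rw [hRY, PySem.List.mem_pyRange_one]; omega, rfl⟩⟩
      have hfind : (PySem.List.sorted (LB.map pvTrip) pvKey false).find?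
          (fun t => pvMaskAt mask (x + t.2.1) (y + t.2.2)) = some (pvTrip q) := by
        apply pvFind_sorted
        · exact PySem.List.sorted_pairwise _ _
        · rw [PySem.List.mem_sorted]; exact List.mem_map_of_mem hqB
        · show pvMaskAt mask (x + q.1) (y + q.2) = true
          rw [hPB q hqB]; exact hVq
        · intro t htm hPt
          rw [PySem.List.mem_sorted] at htm
          obtain ⟨p, hpB, rfl⟩ := List.mem_map.mp htm
          have hPt' : pvMaskAt mask (x + p.1) (y + p.2) = true := hPt
          have hVp : V p = true := by
            rw [hPB p hpB] at hPt'; exact hPt' 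
          rcases hmin p (hsub p hpB) hVp rfl with rfl | hlt
          · exact Or.inl rfl
          · exact Or.inr hlt
      rw [hfind]
      rfl
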